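-- pv_equiv track=rewrite | github.com/jungbug/mp_server | cam4.py | get_additional_candidates
-- ===== SOURCE A (Python) =====
-- def get_additional_candidates(candidates_list, final_id):
--     """
--     1) 각 candidates_dict에서 final_id 제거
--     2) 남은 ID들의 교집합(intersection)을 구함
--        - 교집합이 비어있지 않으면 그 교집합을 반환
--        - 교집합이 비어있으면 "남아 있는 모든 ID들의 합집합(union)"을 반환
--     :param candidates_list: [ {id1: sim1, id2: sim2}, {id2: sim4, id3: sim5}, ... ]
--     :param final_id: ensemble_similar_id로 결정된 최종 ID
--     :return: 추가 후보 ID들의 set (예: {5, 7, 10} 등), 없으면 빈 set()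
--     """
--     all_remaining_sets = []
--
--     for cdict in candidates_list:
--         # picked_id(final_id) 제외
--         filtered_keys = [k for k in cdict.keys() if k != final_id]
--         if len(filtered_keys) > 0:
--             all_remaining_sets.append(set(filtered_keys))
--
--     if not all_remaining_sets:
--         # 남은 후보가 없다면 빈 set
--         return set()
--
--     # 교집합(intersection) 계산
--     intersect_set = all_remaining_sets[0]
--     for s in all_remaining_sets[1:]:
--         intersect_set = intersect_set & s
--
--     if len(intersect_set) > 0:
--         return intersect_set
--     else:
--         # 교집합이 비어있으면 union 반환
--         union_set = set()
--         for s in all_remaining_sets: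
--             union_set = union_set | s
--         return union_set
-- ===== SOURCE B (Python) =====
-- def get_additional_candidates(candidates_list, final_id):
--     # One pass: count, for each id != final_id, in how many (non-empty after
--     # filtering) dicts it appears; threshold on that count.
--     counter = {}
--     n = 0
--     for cdict in candidates_list:
--         keys = [k for k in cdict if k != final_id]
--         if keys:
--             n += 1
--             for k in keys:
--                 counter[k] = counter.get(k, 0) + 1
--     if n == 0:
--         return set()
--     inter = {k for k, c in counter.items() if c == n}
--     return inter if inter else set(counter)
-- ===== Notes on version B (the rewrite author's own statement) =====
-- stated objective: alternative
-- what changed: Replaces A's three loops (collect filtered sets, fold pairwise intersections, fold pairwise unions) by a single pass that builds an occurrence-count table id -> number of non-empty filtered dicts containing it, then reads the intersection as the ids whose count equals the number of such dicts and the union as the table's keys.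
import Mathlib
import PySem

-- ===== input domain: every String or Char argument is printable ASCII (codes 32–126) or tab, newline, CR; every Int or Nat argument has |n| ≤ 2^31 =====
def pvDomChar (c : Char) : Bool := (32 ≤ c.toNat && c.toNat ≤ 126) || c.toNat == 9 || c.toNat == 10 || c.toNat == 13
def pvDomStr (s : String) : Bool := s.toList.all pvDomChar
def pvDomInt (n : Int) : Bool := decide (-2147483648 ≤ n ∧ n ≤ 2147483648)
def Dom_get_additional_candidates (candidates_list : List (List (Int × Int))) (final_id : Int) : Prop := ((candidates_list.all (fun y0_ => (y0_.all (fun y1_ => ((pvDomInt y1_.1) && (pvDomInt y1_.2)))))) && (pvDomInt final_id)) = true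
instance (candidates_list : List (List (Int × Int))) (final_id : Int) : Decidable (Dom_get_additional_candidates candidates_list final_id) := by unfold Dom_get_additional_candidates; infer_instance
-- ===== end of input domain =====

-- B replaces A's two fold loops (intersection fold, union fold) by one occurrence-count
-- table (id -> number of non-empty filtered dicts containing it); objective: alternative.

-- ===== PORT A =====
def get_additional_candidates (candidates_list : List (List (Int × Int))) (final_id : Int) : List Int :=
  let all_remaining_sets : List (PySem.Set Int) :=
    candidates_list.foldl (fun acc cdict =>
      let filtered_keys := (PySem.List.dedup (cdict.map (·.1))).filter (fun k => k != final_id)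
      if filtered_keys.length > 0 then acc ++ [PySem.Set.ofList filtered_keys] else acc) []
  match all_remaining_sets with
  | [] => []
  | s0 :: rest =>
    let intersect_set := rest.foldl (fun s t => PySem.Set.inter s t) s0
    if intersect_set.length > 0 then intersect_set
    else all_remaining_sets.foldl (fun u s => PySem.Set.union u s) PySem.Set.empty

-- ===== PORT B =====
def get_additional_candidates_alt (candidates_list : List (List (Int × Int))) (final_id : Int) : List Int :=
  let st : PySem.Dict Int Int × Int :=
    candidates_list.foldl (fun p cdict =>
      let keys := (PySem.List.dedup (cdict.map (·.1))).filter (fun k => k != final_id)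
      if keys ≠ [] then
        (keys.foldl (fun d k => d.insert k (d.getD k 0 + 1)) p.1, p.2 + 1)
      else p) (PySem.Dict.empty, 0)
  if st.2 = 0 then []
  else
    let inter := (st.1.items.filter (fun kv => kv.2 == st.2)).map (·.1)
    if inter ≠ [] then inter else st.1.keys

-- ===== PRECONDITION & SPEC =====
def Spec_get_additional_candidates (candidates_list : List (List (Int × Int))) (final_id : Int) (out : List Int) : Prop := out = get_additional_candidates_alt candidates_list final_id
instance (candidates_list : List (List (Int × Int))) (final_id : Int) (out : List Int) : Decidable (Spec_get_additional_candidates candidates_list final_id out) := by unfold Spec_get_additional_candidates; infer_instance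

-- ===== CLAIM (what is proved, stated in full; the proofs are below) =====
def Claim_equal_get_additional_candidates : Prop := ∀ (candidates_list : List (List (Int × Int))) (final_id : Int), Dom_get_additional_candidates candidates_list final_id → Spec_get_additional_candidates candidates_list final_id (get_additional_candidates candidates_list final_id)

-- ===== LEMMAS AND PROOFS =====

/-- The keys of one dict, `final_id` removed (shared shape of both ports' per-dict step). -/
def pvK (f : Int) (c : List (Int × Int)) : List Int :=
  (PySem.List.dedup (c.map (·.1))).filter (fun k => k != f)

/-- The non-empty filtered key sets, in order. -/
def pvSets (f : Int) (cl : List (List (Int × Int))) : List (List Int) :=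
  (cl.map (pvK f)).filter (fun l => decide (l ≠ []))

theorem pv_nodup_pvK (f : Int) (c : List (Int × Int)) : (pvK f c).Nodup :=
  (PySem.List.nodup_dedup _).filter _

theorem pv_nodup_mem_sets (f : Int) (cl : List (List (Int × Int))) (s : List Int)
    (h : s ∈ pvSets f cl) : s.Nodup := by
  obtain ⟨hm, -⟩ := List.mem_filter.mp h
  obtain ⟨c, -, rfl⟩ := List.mem_map.mp hm
  exact pv_nodup_pvK f c

/-- A's first loop builds exactly `pvSets` (each set is already duplicate-free). -/
theorem pv_foldA (f : Int) (cl : List (List (Int × Int))) (acc : List (PySem.Set Int)) :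
    cl.foldl (fun acc cdict =>
      let filtered_keys := (PySem.List.dedup (cdict.map (·.1))).filter (fun k => k != f)
      if filtered_keys.length > 0 then acc ++ [PySem.Set.ofList filtered_keys] else acc) acc
    = acc ++ pvSets f cl := by
  show cl.foldl (fun acc cdict =>
      if (pvK f cdict).length > 0 then acc ++ [PySem.Set.ofList (pvK f cdict)] else acc) acc
    = acc ++ pvSets f cl
  induction cl generalizing acc with
  | nil => simp [pvSets]
  | cons c cl ih =>
    rw [List.foldl_cons]
    by_cases h : pvK f c = []
    · rw [if_neg (by simp [h]), ih]
      simp [pvSets, h]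
    · rw [if_pos (by simp [List.length_pos_iff, h]), ih,
        PySem.Set.ofList_eq_self_of_nodup _ (pv_nodup_pvK f c)]
      simp [pvSets, h]

/-- B's single loop: the counter is the nested fold over `pvSets`, and n is its length. -/
theorem pv_foldB (f : Int) (cl : List (List (Int × Int))) (d : PySem.Dict Int Int) (m : Int) :
    cl.foldl (fun p cdict =>
      let keys := (PySem.List.dedup (cdict.map (·.1))).filter (fun k => k != f)
      if keys ≠ [] then
        (keys.foldl (fun d k => d.insert k (d.getD k 0 + 1)) p.1, p.2 + 1)
      else p) (d, m)
    = ((pvSets f cl).foldl (fun d s => s.foldl (fun d k => d.insert k (d.getD k 0 + 1)) d) d,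
       m + ((pvSets f cl).length : Int)) := by
  show cl.foldl (fun p cdict =>
      if pvK f cdict ≠ [] then
        ((pvK f cdict).foldl (fun d k => d.insert k (d.getD k 0 + 1)) p.1, p.2 + 1)
      else p) (d, m) = _
  induction cl generalizing d m with
  | nil => simp [pvSets]
  | cons c cl ih =>
    rw [List.foldl_cons]
    by_cases h : pvK f c = []
    · rw [if_neg (by simp [h]), ih]
      simp [pvSets, h]
    · rw [if_pos h, ih]
      simp only [pvSets, List.map_cons, List.filter_cons, decide_eq_true_eq, if_pos h,
        List.foldl_cons, List.length_cons]
      simp only [Prod.mk.injEq, true_and]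
      push_cast; ring

/-- The nested counting fold is `Counter` of the concatenation. -/
theorem pv_counterC (ss : List (List Int)) :
    ss.foldl (fun d s => s.foldl (fun d k => d.insert k (d.getD k 0 + 1)) d) PySem.Dict.empty
    = PySem.Dict.counter ss.flatten := by
  rw [show PySem.Dict.counter ss.flatten
      = (ss.flatten).foldl (fun d x => d.modify x 0 (· + 1)) PySem.Dict.empty from rfl,
    List.foldl_flatten]
  rfl

/-- A's intersection fold filters the first set by membership in all the others. -/
theorem pv_interA (rest : List (PySem.Set Int)) (s0 : PySem.Set Int) :
    rest.foldl (fun s t => PySem.Set.inter s t) s0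
    = s0.filter (fun k => rest.all (fun s => PySem.Set.contains s k)) := by
  induction rest generalizing s0 with
  | nil => simp
  | cons t rest ih =>
    rw [List.foldl_cons, ih,
      show PySem.Set.inter s0 t = s0.filter (fun k => PySem.Set.contains t k) from rfl,
      List.filter_filter]
    apply List.filter_congr
    intro x _
    simp [List.all_cons, Bool.and_comm]

/-- A's union fold is `update` by the concatenation. -/
theorem pv_unionA (ss : List (PySem.Set Int)) (acc : PySem.Set Int) :
    ss.foldl (fun u s => PySem.Set.union u s) acc = PySem.Set.update acc ss.flatten := by
  induction ss generalizing acc with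
  | nil => rfl
  | cons s ss ih => rw [List.foldl_cons, ih, List.flatten_cons, PySem.Set.update_append]; rfl

/-- Counting over a concatenation of duplicate-free lists: bounded by, and equal to,
the number of lists exactly when every list contains the element. -/
theorem pv_count_flatten (rest : List (List Int)) (hrest : ∀ s ∈ rest, s.Nodup) (k : Int) :
    (rest.flatten).count k ≤ rest.length ∧
      ((rest.flatten).count k = rest.length ↔ ∀ s ∈ rest, k ∈ s) := by
  induction rest with
  | nil => simp
  | cons s rest ih =>
    obtain ⟨h1, h2⟩ := ih (fun t ht => hrest t (List.mem_cons_of_mem _ ht))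
    have hcs : s.count k ≤ 1 := List.nodup_iff_count_le_one.mp (hrest s (by simp)) k
    have hpos : 0 < s.count k ↔ k ∈ s := List.count_pos_iff
    simp only [List.flatten_cons, List.count_append, List.length_cons, List.mem_cons]
    refine ⟨by omega, ?_, ?_⟩
    · intro h t ht
      rcases ht with rfl | ht
      · exact hpos.mp (by omega)
      · exact (h2.mp (by omega)) t ht
    · intro h
      have ha := hpos.mpr (h s (Or.inl rfl))
      have hb := h2.mpr (fun t ht => h t (Or.inr ht))
      omega

/-- Core: the first-set-order intersection equals the count-threshold filter of the
deduplicated concatenation. -/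
theorem pv_core (s0 : List Int) (rest : List (List Int))
    (hs0 : s0.Nodup) (hrest : ∀ s ∈ rest, s.Nodup) :
    s0.filter (fun k => rest.all (fun s => PySem.Set.contains s k))
    = (PySem.Set.ofList (s0 ++ rest.flatten)).filter
        (fun k => ((List.count k (s0 ++ rest.flatten) : Int) == (rest.length : Int) + 1)) := by
  rw [PySem.Set.ofList_append, PySem.Set.ofList_eq_self_of_nodup _ hs0,
    PySem.Set.update_eq_append_filter, List.filter_append]
  have hT : List.filter
      (fun k => ((List.count k (s0 ++ rest.flatten) : Int) == (rest.length : Int) + 1))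
      ((PySem.Set.ofList rest.flatten).filter (fun y => !PySem.Set.contains s0 y)) = [] := by
    apply List.filter_eq_nil_iff.mpr
    intro y hy
    obtain ⟨-, hy2⟩ := List.mem_filter.mp hy
    have hnotin : y ∉ s0 := by simpa using hy2
    have hle : (rest.flatten).count y ≤ rest.length := (pv_count_flatten rest hrest y).1
    have h0 : s0.count y = 0 := List.count_eq_zero.mpr hnotin
    simp only [List.count_append, beq_iff_eq]
    intro he
    omega
  rw [hT, List.append_nil]
  apply List.filter_congr
  intro k hk
  have hc1 : s0.count k = 1 := List.count_eq_one_of_mem hs0 hk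
  obtain ⟨hle, hiff⟩ := pv_count_flatten rest hrest k
  rw [Bool.eq_iff_iff]
  simp only [List.all_eq_true, PySem.Set.contains_iff, beq_iff_eq, List.count_append]
  rw [← hiff]
  push_cast
  omega

/-- The two ports agree everywhere. -/
theorem pv_main (cl : List (List (Int × Int))) (f : Int) :
    get_additional_candidates cl f = get_additional_candidates_alt cl f := by
  simp only [get_additional_candidates, get_additional_candidates_alt,
    pv_foldA, pv_foldB, List.nil_append]
  cases hs : pvSets f cl with
  | nil => simp
  | cons s0 rest =>
    have hs0 : s0.Nodup := pv_nodup_mem_sets f cl s0 (by rw [hs]; simp)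
    have hrest : ∀ s ∈ rest, s.Nodup := fun s h =>
      pv_nodup_mem_sets f cl s (by rw [hs]; exact List.mem_cons_of_mem _ h)
    rw [if_neg (by simp only [List.length_cons, Nat.cast_add, Nat.cast_one]; omega)]
    simp only [pv_counterC, PySem.Dict.items_counter, PySem.Dict.keys_counter,
      List.filter_map, List.map_map, pv_interA, pv_unionA, PySem.Set.update_nil_left,
      List.flatten_cons, List.length_cons, Function.comp_def, zero_add,
      List.map_id', PySem.Set.empty]
    push_cast
    rw [← pv_core s0 rest hs0 hrest]
    by_cases hX : List.filter (fun k => rest.all fun s => PySem.Set.contains s k) s0 = []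
    · rw [if_neg (fun h => List.length_pos_iff.mp h hX), if_neg (not_not_intro hX)]
    · rw [if_pos (List.length_pos_iff.mpr hX), if_pos hX]

-- ===== VERDICT (by name: the statement is the Claim_ definition above) =====
theorem get_additional_candidates_spec : Claim_equal_get_additional_candidates := by
  intro cl f _
  exact pv_main cl f
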